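-- pv_equiv track=rewrite | github.com/erickmiller/AutomatousSourceCode | AutonomousSourceCode/data/raw/sort/a61ec616-177e-413f-b1c9-2f821c907b2c__proteingroup_sorters.py | sort_amounts
-- ===== SOURCE A (Python) =====
-- def sort_amounts(proteins, sort_index):
--     """Generic function for sorting peptides and psms. Assumes a higher
--     number is better for what is passed at sort_index position in protein."""
--     amounts = {}
--     for protein in proteins:
--         amount_x_for_protein = protein[sort_index]
--         try:
--             amounts[amount_x_for_protein].append(protein)
--         except KeyError:
--             amounts[amount_x_for_protein] = [protein]
--     return [v for k, v in sorted(amounts.items(), reverse=True)]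
-- ===== SOURCE B (Python) =====
-- def sort_amounts(proteins, sort_index):
--     """Generic function for sorting peptides and psms. Assumes a higher
--     number is better for what is passed at sort_index position in protein."""
--     keys = sorted({protein[sort_index] for protein in proteins}, reverse=True)
--     return [[protein for protein in proteins if protein[sort_index] == key]
--             for key in keys]
-- ===== Notes on version B (the rewrite author's own statement) =====
-- stated objective: simpler
-- what changed: B drops A's dict-grouping loop with try/except and the sort of dict items: it sorts the distinct key values descending and builds each group by filtering the input per key.
import Mathlib
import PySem

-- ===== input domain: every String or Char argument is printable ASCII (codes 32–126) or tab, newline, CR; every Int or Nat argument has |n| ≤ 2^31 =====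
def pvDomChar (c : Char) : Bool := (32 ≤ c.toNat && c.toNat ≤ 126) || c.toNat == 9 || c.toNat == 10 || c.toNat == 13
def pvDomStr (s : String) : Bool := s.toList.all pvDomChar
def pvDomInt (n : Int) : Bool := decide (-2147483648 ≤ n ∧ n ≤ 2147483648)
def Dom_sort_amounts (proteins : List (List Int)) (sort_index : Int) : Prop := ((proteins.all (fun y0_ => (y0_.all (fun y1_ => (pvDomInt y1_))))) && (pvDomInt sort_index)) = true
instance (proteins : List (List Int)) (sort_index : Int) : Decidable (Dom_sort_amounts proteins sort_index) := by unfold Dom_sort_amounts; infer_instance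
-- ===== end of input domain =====

-- B replaces A's dict-grouping loop + sort of dict items by: sort the distinct keys
-- descending, then filter the input per key (objective: simpler).

-- ===== PORT A =====
def sort_amounts (proteins : List (List Int)) (sort_index : Int) : List (List (List Int)) :=
  -- the try/except body is exactly  amounts[k] = amounts.get(k, []) + [protein],
  -- i.e. Dict.modify k [] (· ++ [protein])
  let amounts : PySem.Dict Int (List (List Int)) :=
    proteins.foldl
      (fun amounts protein =>
        amounts.modify (PySem.List.pyGetD protein sort_index 0) [] (· ++ [protein]))
      PySem.Dict.empty
  -- sorted(amounts.items(), reverse=True): dict keys are distinct, so Python's tuple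
  -- comparison reduces to comparison of the keys; exact here
  (PySem.List.sorted amounts.items (fun q => q.1) true).map (fun q => q.2)

-- ===== PORT B =====
def sort_amounts_alt (proteins : List (List Int)) (sort_index : Int) : List (List (List Int)) :=
  let keys := PySem.List.sorted
      (PySem.Set.ofList (proteins.map (fun p => PySem.List.pyGetD p sort_index 0)))
      (fun x => x) true
  keys.map (fun key =>
    proteins.filter (fun p => PySem.List.pyGetD p sort_index 0 == key))

-- ===== PRECONDITION & SPEC =====
-- A raises IndexError when protein[sort_index] is out of range for some protein; exactly those inputs are excluded.
def Pre_sort_amounts (proteins : List (List Int)) (sort_index : Int) : Prop :=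
  ∀ p ∈ proteins, PySem.Raise.InRange p.length sort_index
instance (proteins : List (List Int)) (sort_index : Int) : Decidable (Pre_sort_amounts proteins sort_index) := by unfold Pre_sort_amounts; infer_instance
def pvWitness_sort_amounts : List (List Int) × Int := ([[3, 1], [2, 5], [3, 9]], 0)

def Spec_sort_amounts (proteins : List (List Int)) (sort_index : Int) (out : List (List (List Int))) : Prop := out = sort_amounts_alt proteins sort_index
instance (proteins : List (List Int)) (sort_index : Int) (out : List (List (List Int))) : Decidable (Spec_sort_amounts proteins sort_index out) := by unfold Spec_sort_amounts; infer_instance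

-- ===== CLAIM (what is proved, stated in full; the proofs are below) =====
def Claim_equal_sort_amounts : Prop := ∀ (proteins : List (List Int)) (sort_index : Int), Dom_sort_amounts proteins sort_index → Pre_sort_amounts proteins sort_index → Spec_sort_amounts proteins sort_index (sort_amounts proteins sort_index)

-- ===== LEMMAS AND PROOFS =====

-- the grouping dict A builds: its lookup at any key c is the filter of proteins by that key
theorem pv_getD_group (proteins : List (List Int)) (sort_index : Int) (c : Int) :
    (proteins.foldl
      (fun amounts protein =>
        amounts.modify (PySem.List.pyGetD protein sort_index 0) [] (· ++ [protein]))
      PySem.Dict.empty).getD c []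
    = proteins.filter (fun p => PySem.List.pyGetD p sort_index 0 == c) := by
  have h := PySem.Dict.getD_foldl_modify_append
      (proteins.map (fun p => (PySem.List.pyGetD p sort_index 0, p)))
      (PySem.Dict.empty (κ := Int) (ν := List (List Int))) c
  rw [List.foldl_map] at h
  simp only [h, List.filter_map, PySem.Dict.getD_empty, List.map_map, List.nil_append]
  simp [Function.comp_def]

theorem sort_amounts_spec : Claim_equal_sort_amounts := by
  intro proteins sort_index _ _
  unfold Spec_sort_amounts sort_amounts sort_amounts_alt
  set k : List Int → Int := fun p => PySem.List.pyGetD p sort_index 0 with hk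
  set K : List Int := PySem.Set.ofList (proteins.map k) with hK
  set L : List Int := PySem.List.sorted K (fun x => x) true with hL
  set g : Int → Int × List (List Int) := fun c => (c, proteins.filter (fun p => k p == c)) with hg
  set d : PySem.Dict Int (List (List Int)) :=
    proteins.foldl (fun amounts protein => amounts.modify (k protein) [] (· ++ [protein]))
      PySem.Dict.empty with hd
  have hkeys : d.keys = K := by
    rw [hd, PySem.Dict.keys_foldl_modify_key proteins k [] (fun _ p v => v ++ [p])]
    simp [hK, PySem.Set.update, PySem.Set.ofList_eq_foldl, PySem.Dict.keys_empty]
  have hnodupK : K.Nodup := by rw [hK]; exact PySem.Set.nodup_ofList _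
  have hitems : d.items = K.map g := by
    rw [PySem.Dict.items_eq_map_keys d (by rw [hkeys]; exact hnodupK) [], hkeys]
    refine List.map_congr_left (fun c _ => ?_)
    rw [hd, pv_getD_group proteins sort_index c]
  have hLnodup : L.Nodup := ((PySem.List.sorted_perm K (fun x => x) true).nodup_iff).mpr hnodupK
  have hLsorted : L.Pairwise (fun a b => b < a) := by
    have h1 : L.Pairwise (fun a b : Int => b ≤ a) := PySem.List.sorted_pairwise_rev K (fun x => x)
    exact (h1.and hLnodup).imp (fun h => lt_of_le_of_ne h.1 (Ne.symm h.2))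
  have hsorted : PySem.List.sorted d.items (fun q => q.1) true = L.map g := by
    apply PySem.List.sorted_rev_eq_of_perm_of_pairwise_gt
    · rw [hitems]; exact (PySem.List.sorted_perm K (fun x => x) true).map g
    · rw [List.pairwise_map]; exact hLsorted
  show (PySem.List.sorted d.items (fun q => q.1) true).map (fun q => q.2)
      = L.map (fun key => proteins.filter (fun p => PySem.List.pyGetD p sort_index 0 == key))
  rw [hsorted, List.map_map]
  rfl
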